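-- pv_equiv track=rewrite | github.com/Mihai1912/Csv_handler | backup.py | custom_cross_join
-- ===== SOURCE A (Python) =====
-- def custom_cross_join(table1, table2, table3):
--     # Rezultatul join-ului: o listă de dicționare
--     result = []
--
--     # Iterăm prin fiecare combinație de rânduri dintre primele două tabele
--     for row1 in table1:
--         for row2 in table2:
--             # Combinăm rândurile din primele două tabele
--             combined_row12 = {**row1, **row2}
--             for row3 in table3:
--                 # Apoi combinăm rezultatul cu fiecare rând din a treia tabelă
--                 combined_row123 = {**combined_row12, **row3}
--                 # Adăugăm rândul combinat în rezultat
--                 result.append(combined_row123)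
--
--     return result
-- ===== SOURCE B (Python) =====
-- def custom_cross_join(table1, table2, table3):
--     # Single flat loop over the product of sizes; each output position k is
--     # decoded arithmetically into its (row1, row2, row3) indices, and the merged
--     # row is built in one pass (precedence row3 > row2 > row1).
--     n1, n2, n3 = len(table1), len(table2), len(table3)
--     result = []
--     for k in range(n1 * n2 * n3):
--         i, r = divmod(k, n2 * n3)
--         j, l = divmod(r, n3)
--         row = dict(table1[i])
--         row.update(table2[j])
--         row.update(table3[l])
--         result.append(row)
--     return result
-- ===== Notes on version B (the rewrite author's own statement) =====
-- stated objective: alternative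
-- what changed: Replaces the fused triple nested loop by a single flat loop over range(n1*n2*n3) that decodes each position into its three row indices with divmod and builds the merged row in one dict pass.
import Mathlib
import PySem

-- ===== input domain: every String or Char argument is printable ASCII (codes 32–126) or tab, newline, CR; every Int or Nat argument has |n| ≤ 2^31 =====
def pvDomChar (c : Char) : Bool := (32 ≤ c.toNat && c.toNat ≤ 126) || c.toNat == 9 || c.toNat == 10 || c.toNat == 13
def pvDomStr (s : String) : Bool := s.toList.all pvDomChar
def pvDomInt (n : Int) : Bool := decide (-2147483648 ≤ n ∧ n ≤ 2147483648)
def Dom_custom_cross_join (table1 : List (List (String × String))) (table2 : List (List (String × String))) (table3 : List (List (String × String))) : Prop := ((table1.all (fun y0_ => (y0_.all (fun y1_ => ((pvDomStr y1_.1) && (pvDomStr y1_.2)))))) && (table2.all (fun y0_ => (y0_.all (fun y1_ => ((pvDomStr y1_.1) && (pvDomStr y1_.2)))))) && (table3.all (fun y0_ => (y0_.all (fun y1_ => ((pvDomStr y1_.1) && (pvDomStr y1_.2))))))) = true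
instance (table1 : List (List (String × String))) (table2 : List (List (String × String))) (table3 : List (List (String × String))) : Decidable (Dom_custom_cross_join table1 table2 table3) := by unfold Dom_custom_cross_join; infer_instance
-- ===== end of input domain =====

-- B replaces A's fused triple nested loop by ONE flat loop over range(n1*n2*n3):
-- each output position k is decoded with divmod into its three row indices and the
-- merged row is built in a single dict pass; same cost, different decomposition.

-- Python's '{**a, **b}' (fresh dict, right-precedence merge), returned as its item list
def pvMergeDicts (a b : List (String × String)) : List (String × String) :=
  (b.foldl (fun d kv => d.insert kv.1 kv.2)
    (a.foldl (fun d kv => d.insert kv.1 kv.2) PySem.Dict.empty)).items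

-- ===== PORT A =====
def custom_cross_join (table1 : List (List (String × String))) (table2 : List (List (String × String))) (table3 : List (List (String × String))) : List (List (String × String)) :=
  table1.foldl (fun result row1 =>
    table2.foldl (fun result row2 =>
      let combined_row12 := pvMergeDicts row1 row2
      table3.foldl (fun result row3 =>
        result ++ [pvMergeDicts combined_row12 row3]) result) result) []

-- ===== PORT B =====
-- 'row = dict(table1[i]); row.update(table2[j]); row.update(table3[l])': three insert passes from empty
def pvRow3 (r1 r2 r3 : List (String × String)) : List (String × String) :=
  (r3.foldl (fun d kv => d.insert kv.1 kv.2)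
    (r2.foldl (fun d kv => d.insert kv.1 kv.2)
      (r1.foldl (fun d kv => d.insert kv.1 kv.2) PySem.Dict.empty))).items

-- the indices produced by divmod are always in range, so Python's table[i] never
-- raises; the '.getD []' defaults of pyGetD are unreachable (exact on all reachable inputs)
def custom_cross_join_alt (table1 : List (List (String × String))) (table2 : List (List (String × String))) (table3 : List (List (String × String))) : List (List (String × String)) :=
  let n1 : Int := table1.length
  let n2 : Int := table2.length
  let n3 : Int := table3.length
  (PySem.List.pyRange 0 (n1 * n2 * n3) 1).foldl (fun result k =>
    let i := PySem.Int.floordiv k (n2 * n3)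
    let r := PySem.Int.mod k (n2 * n3)
    let j := PySem.Int.floordiv r n3
    let l := PySem.Int.mod r n3
    result ++ [pvRow3 (PySem.List.pyGetD table1 i []) (PySem.List.pyGetD table2 j []) (PySem.List.pyGetD table3 l [])]) []

-- ===== PRECONDITION & SPEC =====
def Spec_custom_cross_join (table1 : List (List (String × String))) (table2 : List (List (String × String))) (table3 : List (List (String × String))) (out : List (List (String × String))) : Prop := out = custom_cross_join_alt table1 table2 table3
instance (table1 : List (List (String × String))) (table2 : List (List (String × String))) (table3 : List (List (String × String))) (out : List (List (String × String))) : Decidable (Spec_custom_cross_join table1 table2 table3 out) := by unfold Spec_custom_cross_join; infer_instance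

-- ===== CLAIM (what is proved, stated in full; the proofs are below) =====
def Claim_equal_custom_cross_join : Prop := ∀ (table1 : List (List (String × String))) (table2 : List (List (String × String))) (table3 : List (List (String × String))), Dom_custom_cross_join table1 table2 table3 → Spec_custom_cross_join table1 table2 table3 (custom_cross_join table1 table2 table3)

-- ===== LEMMAS AND PROOFS =====

-- rebuilding a dict from its own items gives the dict back
lemma rebuild_items (d : PySem.Dict String String) (h : d.keys.Nodup) :
    d.items.foldl (fun d kv => d.insert kv.1 kv.2) PySem.Dict.empty = d := by
  apply PySem.Dict.ext
  have := PySem.Dict.items_foldl_insert_fresh (l := d.items) (k := fun p => p.1) (v := fun p => p.2)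
    (d := PySem.Dict.empty) (by intro a _; simp) (by simpa [PySem.Dict.keys] using h)
  simpa using this

lemma merge_assoc (r1 r2 r3 : List (String × String)) :
    pvMergeDicts (pvMergeDicts r1 r2) r3 = pvRow3 r1 r2 r3 := by
  unfold pvMergeDicts pvRow3
  congr 1
  congr 1
  apply rebuild_items
  exact PySem.Dict.nodup_keys_foldl_insert_key _ _ _ _
    (PySem.Dict.nodup_keys_foldl_insert_key _ _ _ _ (by simp))

-- A as flatMap
lemma A_flat (t1 t2 t3 : List (List (String × String))) :
    custom_cross_join t1 t2 t3 = t1.flatMap (fun r1 => t2.flatMap (fun r2 => t3.map (fun r3 => pvRow3 r1 r2 r3))) := by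
  unfold custom_cross_join
  simp only [merge_assoc, PySem.List.foldl_append_singleton_eq_map, PySem.List.foldl_append_eq_flatMap,
    List.nil_append]

-- range decode lemma
lemma range_mul {α : Type} (a b : Nat) (g : Nat → Nat → α) :
    (List.range (a*b)).map (fun k => g (k / b) (k % b))
      = (List.range a).flatMap (fun i => (List.range b).map (fun j => g i j)) := by
  induction a with
  | zero => simp
  | succ a ih =>
    rcases Nat.eq_zero_or_pos b with hb | hb
    · simp [hb]
    · have : (a+1)*b = a*b + b := by ring
      rw [this, List.range_add, List.map_append, ih, List.range_succ, List.flatMap_append]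
      congr 1
      simp only [List.map_map, List.flatMap_singleton]
      apply List.map_congr_left
      intro j hj
      have hj' : j < b := List.mem_range.mp hj
      simp only [Function.comp]
      congr 1
      · rw [mul_comm a b, Nat.mul_add_div hb, Nat.div_eq_of_lt hj']
        omega
      · rw [mul_comm a b, Nat.mul_add_mod, Nat.mod_eq_of_lt hj']


-- map/flatMap over range of getD equal map/flatMap over the list
lemma map_range_getD {α β : Type} (xs : List α) (d : α) (F : α → β) :
    (List.range xs.length).map (fun i => F (xs.getD i d)) = xs.map F := by
  apply List.ext_getElem (by simp)
  intro n h1 h2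
  have hn : n < xs.length := by simpa using h2
  simp [List.getD_eq_getElem?_getD, List.getElem?_eq_getElem hn]

lemma flatMap_range_getD {α β : Type} (xs : List α) (d : α) (F : α → List β) :
    (List.range xs.length).flatMap (fun i => F (xs.getD i d)) = xs.flatMap F := by
  rw [List.flatMap_def, List.flatMap_def, map_range_getD]

lemma pv_main (t1 t2 t3 : List (List (String × String))) :
    custom_cross_join t1 t2 t3 = custom_cross_join_alt t1 t2 t3 := by
  rw [A_flat]
  unfold custom_cross_join_alt
  simp only [PySem.List.foldl_append_singleton_eq_map, List.nil_append, PySem.List.pyRange_one,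
    List.map_map, Function.comp_def, zero_add]
  have hN : (((t1.length : Int)) * t2.length * t3.length - 0).toNat = t1.length * (t2.length * t3.length) := by
    rw [sub_zero, show ((t1.length : Int)) * t2.length * t3.length = ((t1.length * (t2.length * t3.length) : Nat) : Int) from by push_cast; ring]
    exact Int.toNat_natCast _
  rw [hN]
  have key : (fun k : Nat =>
      pvRow3 (PySem.List.pyGetD t1 (PySem.Int.floordiv (k : Int) (↑t2.length * ↑t3.length)) [])
        (PySem.List.pyGetD t2 (PySem.Int.floordiv (PySem.Int.mod (k : Int) (↑t2.length * ↑t3.length)) ↑t3.length) [])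
        (PySem.List.pyGetD t3 (PySem.Int.mod (PySem.Int.mod (k : Int) (↑t2.length * ↑t3.length)) ↑t3.length) []))
      = (fun k : Nat => pvRow3 (t1.getD (k / (t2.length * t3.length)) [])
          (t2.getD (k % (t2.length * t3.length) / t3.length) [])
          (t3.getD (k % (t2.length * t3.length) % t3.length) [])) := by
    funext k
    have hc : ((t2.length : Int) * (t3.length : Int)) = ((t2.length * t3.length : Nat) : Int) := by push_cast; ring
    rw [hc, PySem.Int.floordiv_natCast, PySem.Int.mod_natCast, PySem.Int.floordiv_natCast,
      PySem.Int.mod_natCast, PySem.List.pyGetD_natCast, PySem.List.pyGetD_natCast, PySem.List.pyGetD_natCast]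
  rw [key]
  rw [range_mul t1.length (t2.length * t3.length)
    (fun i r => pvRow3 (t1.getD i []) (t2.getD (r / t3.length) []) (t3.getD (r % t3.length) []))]
  rw [flatMap_range_getD t1 [] (fun r1 => List.map (fun j => pvRow3 r1 (t2.getD (j / t3.length) []) (t3.getD (j % t3.length) [])) (List.range (t2.length * t3.length)))]
  apply List.flatMap_congr
  intro r1 _
  rw [range_mul t2.length t3.length (fun j l => pvRow3 r1 (t2.getD j []) (t3.getD l []))]
  rw [flatMap_range_getD t2 [] (fun r2 => List.map (fun l => pvRow3 r1 r2 (t3.getD l [])) (List.range t3.length))]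
  apply List.flatMap_congr
  intro r2 _
  rw [map_range_getD t3 [] (fun r3 => pvRow3 r1 r2 r3)]

-- ===== VERDICT (by name: the statement is the Claim_ definition above) =====
theorem custom_cross_join_spec : Claim_equal_custom_cross_join := by
  intro t1 t2 t3 _
  exact pv_main t1 t2 t3
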